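-- pv_equiv track=rewrite | github.com/RomanCohort/confluencia | confluencia-2.0-epitope/core/sensitivity.py | _detect_input_type_from_features
-- ===== SOURCE A (Python) =====
-- from typing import Any, Dict, Iterable, List, Optional, Tuple, cast
--
-- def _detect_input_type_from_features(feature_names: List[str]) -> str:
--     """Heuristic to detect input data type from feature names.
--
--     Returns one of: 'epitope', 'drug', 'env_only', 'unknown'.
--     """
--     fn = [str(n).lower() for n in feature_names]
--     if any(n.startswith("aac_") or "hydropathy" in n or "frac_nonpolar" in n for n in fn):
--         return "epitope"
--     if any("smiles" in n or "mol" in n or "rdkit" in n for n in fn):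
--         return "drug"
--     if any(n.startswith("env_") for n in fn) and len(fn) <= 6:
--         return "env_only"
--     return "unknown"
-- ===== SOURCE B (Python) =====
-- def _detect_input_type_from_features(feature_names):
--     """Heuristic to detect input data type from feature names.
--
--     Returns one of: 'epitope', 'drug', 'env_only', 'unknown'.
--     """
--     # Classify each name independently into a priority rank
--     # (0=epitope marker, 1=drug marker, 2=env marker, 3=no marker),
--     # then aggregate by taking the best (minimum) rank.
--     def rank(name):
--         n = str(name).lower()
--         if n.startswith("aac_") or "hydropathy" in n or "frac_nonpolar" in n:
--             return 0
--         if "smiles" in n or "mol" in n or "rdkit" in n: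
--             return 1
--         if n.startswith("env_"):
--             return 2
--         return 3
--
--     best = min(map(rank, feature_names), default=3)
--     if best == 0:
--         return "epitope"
--     if best == 1:
--         return "drug"
--     if best == 2 and len(feature_names) <= 6:
--         return "env_only"
--     return "unknown"
-- ===== Notes on version B (the rewrite author's own statement) =====
-- stated objective: alternative
-- what changed: Instead of A's per-category any(...) scans over the whole list, B classifies each name independently into a numeric priority rank (0=epitope, 1=drug, 2=env, 3=none) and aggregates with a single min(), decoding the best rank into the result; priority becomes numeric ordering rather than control flow.
import Mathlib
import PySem

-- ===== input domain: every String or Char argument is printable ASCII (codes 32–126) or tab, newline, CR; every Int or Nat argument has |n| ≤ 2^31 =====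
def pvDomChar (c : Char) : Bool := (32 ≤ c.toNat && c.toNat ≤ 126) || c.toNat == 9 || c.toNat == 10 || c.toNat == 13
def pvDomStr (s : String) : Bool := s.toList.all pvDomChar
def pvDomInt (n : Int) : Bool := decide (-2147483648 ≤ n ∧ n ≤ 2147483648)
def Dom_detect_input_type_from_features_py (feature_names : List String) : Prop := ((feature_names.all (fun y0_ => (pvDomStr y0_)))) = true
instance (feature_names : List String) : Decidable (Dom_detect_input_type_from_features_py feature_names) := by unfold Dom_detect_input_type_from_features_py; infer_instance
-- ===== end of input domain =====

-- B replaces A's per-category any(...) scans by a per-name priority rank (0..3) aggregated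
-- with a single min, decoding the best rank (objective: alternative decomposition, same cost).

-- ===== PORT A =====
-- the three per-name tests, on an already-lowered name (shared text with A's any(...) bodies)
def pvEpi (n : String) : Bool :=
  PySem.Str.startswith n "aac_" || PySem.Str.isIn "hydropathy" n || PySem.Str.isIn "frac_nonpolar" n

def pvDrug (n : String) : Bool :=
  PySem.Str.isIn "smiles" n || PySem.Str.isIn "mol" n || PySem.Str.isIn "rdkit" n

def pvEnv (n : String) : Bool := PySem.Str.startswith n "env_"

def detect_input_type_from_features_py (feature_names : List String) : String :=
  let fn := feature_names.map (fun n => PySem.Str.lower n)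
  if fn.any pvEpi then "epitope"
  else if fn.any pvDrug then "drug"
  else if fn.any pvEnv && decide (fn.length ≤ 6) then "env_only"
  else "unknown"

-- ===== PORT B =====
-- B's per-name classifier: priority rank 0=epitope marker, 1=drug marker, 2=env marker, 3=none
def pvRank (name : String) : Nat :=
  let n := PySem.Str.lower name
  if pvEpi n then 0
  else if pvDrug n then 1
  else if pvEnv n then 2
  else 3

def detect_input_type_from_features_py_alt (feature_names : List String) : String :=
  -- min(map(rank, feature_names), default=3) as the left fold of Nat.min
  let best := (feature_names.map pvRank).foldl (fun a b => min a b) 3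
  if best = 0 then "epitope"
  else if best = 1 then "drug"
  else if best = 2 && decide (feature_names.length ≤ 6) then "env_only"
  else "unknown"

-- ===== PRECONDITION & SPEC =====
def Spec_detect_input_type_from_features_py (feature_names : List String) (out : String) : Prop := out = detect_input_type_from_features_py_alt feature_names
instance (feature_names : List String) (out : String) : Decidable (Spec_detect_input_type_from_features_py feature_names out) := by unfold Spec_detect_input_type_from_features_py; infer_instance

-- ===== CLAIM (what is proved, stated in full; the proofs are below) =====
def Claim_equal_detect_input_type_from_features_py : Prop := ∀ (feature_names : List String), Dom_detect_input_type_from_features_py feature_names → Spec_detect_input_type_from_features_py feature_names (detect_input_type_from_features_py feature_names)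

-- ===== LEMMAS AND PROOFS =====

-- A's cascade of any(...) scans, expressed as the best rank it would report
def pvBest (l : List String) : Nat :=
  let fn := l.map (fun n => PySem.Str.lower n)
  if fn.any pvEpi then 0
  else if fn.any pvDrug then 1
  else if fn.any pvEnv then 2
  else 3

theorem pvRank_min_best (x : String) (xs : List String) :
    min (pvRank x) (pvBest xs) = pvBest (x :: xs) := by
  simp only [pvRank, pvBest, List.map_cons, List.any_cons]
  by_cases h1 : pvEpi (PySem.Str.lower x) <;>
  by_cases h2 : pvDrug (PySem.Str.lower x) <;>
  by_cases h3 : pvEnv (PySem.Str.lower x) <;>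
  by_cases h4 : (xs.map (fun n => PySem.Str.lower n)).any pvEpi <;>
  by_cases h5 : (xs.map (fun n => PySem.Str.lower n)).any pvDrug <;>
  by_cases h6 : (xs.map (fun n => PySem.Str.lower n)).any pvEnv <;>
  simp [h1, h2, h3, h4, h5, h6]

theorem pvFold_min (l : List String) (a : Nat) (h : a ≤ 3) :
    (l.map pvRank).foldl (fun a b => min a b) a = min a (pvBest l) := by
  induction l generalizing a with
  | nil => simp [pvBest]; omega
  | cons x xs ih =>
      have hr : min a (pvRank x) ≤ 3 := le_trans (Nat.min_le_left _ _) h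
      simp only [List.map_cons, List.foldl_cons]
      rw [ih _ hr, Nat.min_assoc, pvRank_min_best]

theorem detect_eq (l : List String) :
    detect_input_type_from_features_py l = detect_input_type_from_features_py_alt l := by
  unfold detect_input_type_from_features_py detect_input_type_from_features_py_alt
  rw [pvFold_min l 3 (le_refl 3)]
  simp only [pvBest]
  by_cases h1 : (l.map (fun n => PySem.Str.lower n)).any pvEpi <;>
  by_cases h2 : (l.map (fun n => PySem.Str.lower n)).any pvDrug <;>
  by_cases h3 : (l.map (fun n => PySem.Str.lower n)).any pvEnv <;>
  simp [h1, h2, h3]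

-- ===== VERDICT (by name: the statement is the Claim_ definition above) =====
theorem detect_input_type_from_features_py_spec : Claim_equal_detect_input_type_from_features_py := by
  intro fs _
  unfold Spec_detect_input_type_from_features_py
  exact detect_eq fs
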